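-- pv_equiv track=rewrite | github.com/Mohamed55088/sentiment-analysis-logistic-regression | IMDB.py | handle_negations
-- ===== SOURCE A (Python) =====
-- def handle_negations(text):
--     negation_words = set(["not", "no", "never", "n't"])
--     words = text.split()
--     negated_text = []
--     negate = False
--     for word in words:
--         if word in negation_words:
--             negate = True
--             negated_text.append(word)
--         elif negate:
--             negated_text.append(word + "_NEG")
--             negate = False
--         else:
--             negated_text.append(word)
--     return ' '.join(negated_text)
-- ===== SOURCE B (Python) =====
-- def handle_negations(text):
--     negation_words = {"not", "no", "never", "n't"}
--     words = text.split()
--     return ' '.join(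
--         w + "_NEG" if prev in negation_words and w not in negation_words else w
--         for prev, w in zip([None] + words, words))
-- ===== Notes on version B (the rewrite author's own statement) =====
-- stated objective: alternative
-- what changed: Replaces the carried boolean negation flag with a stateless predecessor lookup: each word is paired with the previous word by zipping the list with a shifted copy, and is suffixed exactly when the predecessor is a negation word and it is not.
import Mathlib
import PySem

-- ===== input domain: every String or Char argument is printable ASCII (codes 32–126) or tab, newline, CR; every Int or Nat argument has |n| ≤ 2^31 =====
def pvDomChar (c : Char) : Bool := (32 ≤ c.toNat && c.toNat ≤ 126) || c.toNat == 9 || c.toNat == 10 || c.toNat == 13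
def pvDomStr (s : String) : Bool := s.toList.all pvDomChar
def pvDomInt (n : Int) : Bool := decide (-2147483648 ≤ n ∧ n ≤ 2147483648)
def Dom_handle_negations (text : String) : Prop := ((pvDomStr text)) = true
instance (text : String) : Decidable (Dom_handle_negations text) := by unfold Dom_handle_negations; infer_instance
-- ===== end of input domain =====

-- B replaces A's carried 'negate' flag by a stateless predecessor lookup (zip with a shifted copy); same result.

-- ===== PORT A =====
def handle_negations (text : String) : String :=
  let negation_words : PySem.Set String := PySem.Set.ofList ["not", "no", "never", "n't"]
  let words := PySem.Str.split₀ text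
  let st := words.foldl (fun (st : List String × Bool) word =>
    if negation_words.contains word then (st.1 ++ [word], true)
    else if st.2 then (st.1 ++ [word ++ "_NEG"], false)
    else (st.1 ++ [word], st.2)) (([] : List String), false)
  PySem.Str.join " " st.1

-- ===== PORT B =====
def handle_negations_alt (text : String) : String :=
  let negation_words : PySem.Set String := PySem.Set.ofList ["not", "no", "never", "n't"]
  let words := PySem.Str.split₀ text
  PySem.Str.join " "
    ((((none : Option String) :: words.map some).zip words).map (fun pw =>
      if (match pw.1 with | some p => negation_words.contains p | none => false)
          && !negation_words.contains pw.2
      then pw.2 ++ "_NEG" else pw.2))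

-- ===== PRECONDITION & SPEC =====
def Spec_handle_negations (text : String) (out : String) : Prop := out = handle_negations_alt text
instance (text : String) (out : String) : Decidable (Spec_handle_negations text out) := by unfold Spec_handle_negations; infer_instance

-- ===== CLAIM (what is proved, stated in full; the proofs are below) =====
def Claim_equal_handle_negations : Prop := ∀ (text : String), Dom_handle_negations text → Spec_handle_negations text (handle_negations text)

-- ===== LEMMAS AND PROOFS =====

def pvNeg : PySem.Set String := PySem.Set.ofList ["not", "no", "never", "n't"]

def pvFlag (p : Option String) : Bool :=
  match p with | some x => pvNeg.contains x | none => false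

def pvG (pw : Option String × String) : String :=
  if pvFlag pw.1 && !pvNeg.contains pw.2 then pw.2 ++ "_NEG" else pw.2

lemma pv_loop_eq (ws : List String) (acc : List String) (p : Option String) :
    (ws.foldl (fun (st : List String × Bool) word =>
      if pvNeg.contains word then (st.1 ++ [word], true)
      else if st.2 then (st.1 ++ [word ++ "_NEG"], false)
      else (st.1 ++ [word], st.2)) (acc, pvFlag p)).1
    = acc ++ ((p :: ws.map some).zip ws).map pvG := by
  induction ws generalizing acc p with
  | nil => simp
  | cons w ws ih =>
    simp only [List.foldl_cons, List.map_cons, List.zip_cons_cons]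
    by_cases hw : pvNeg.contains w
    · have hwm : w ∈ pvNeg := by simpa using hw
      have h1 : pvFlag (some w) = true := hw
      rw [show (if pvNeg.contains w then (acc ++ [w], true)
          else if pvFlag p then (acc ++ [w ++ "_NEG"], false)
          else (acc ++ [w], pvFlag p)) = (acc ++ [w], pvFlag (some w)) by
        simp [hwm, h1]]
      rw [ih (acc ++ [w]) (some w)]
      simp [pvG, hwm, List.append_assoc]
    · have hwm : w ∉ pvNeg := by simpa using hw
      have h0 : pvFlag (some w) = false := by simp [pvFlag, hwm]
      by_cases hp : pvFlag p
      · rw [show (if pvNeg.contains w then (acc ++ [w], true)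
            else if pvFlag p then (acc ++ [w ++ "_NEG"], false)
            else (acc ++ [w], pvFlag p)) = (acc ++ [w ++ "_NEG"], pvFlag (some w)) by
          simp [hwm, hp, h0]]
        rw [ih (acc ++ [w ++ "_NEG"]) (some w)]
        simp [pvG, hwm, hp, List.append_assoc]
      · have hp' : pvFlag p = false := by simpa using hp
        rw [show (if pvNeg.contains w then (acc ++ [w], true)
            else if pvFlag p then (acc ++ [w ++ "_NEG"], false)
            else (acc ++ [w], pvFlag p)) = (acc ++ [w], pvFlag (some w)) by
          simp [hwm, hp', h0]]
        rw [ih (acc ++ [w]) (some w)]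
        simp [pvG, hwm, hp', List.append_assoc]

-- ===== VERDICT (by name: the statement is the Claim_ definition above) =====
theorem handle_negations_spec : Claim_equal_handle_negations := by
  intro text _
  unfold Spec_handle_negations handle_negations handle_negations_alt
  simp only []
  refine congrArg (PySem.Str.join " ") ((pv_loop_eq (PySem.Str.split₀ text) [] none).trans ?_)
  simp only [List.nil_append]
  apply List.map_congr_left
  intro pw _
  simp only [pvG, pvFlag, pvNeg]
  cases pw.1 <;> simp
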